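-- pv_equiv track=rewrite | github.com/LLagoon3/Programmers | Python3/Level_2/코딩테스트 연습 연습문제 디펜스 게임.py | solution
-- ===== SOURCE A (Python) =====
-- def solution(n, k, enemy):
--     result, cnt = [[n, k]], 0
--     for i in range(0, len(enemy)):
--         tmp = []
--         for r in result:
--             if r[1] - 1 >= 0: tmp.append([r[0], r[1] - 1])
--             if r[0] - enemy[i] >= 0: tmp.append([r[0] - enemy[i], r[1]])
--         cnt += 1
--         result = tmp
--         if not result: return cnt - 1
--     return len(enemy)
-- ===== SOURCE B (Python) =====
-- def solution(n, k, enemy):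
--     # DP over immunities used: best[u] = max health reachable having used u
--     # immunities (None = unreachable); exponential state list becomes O(min(n,k)) slots.
--     cap = max(k, 0)
--     best = [n]
--     for rounds in range(len(enemy)):
--         e = enemy[rounds]
--         new = []
--         for u in range(min(len(best), cap) + 1):
--             c1 = best[u] if u < len(best) else None
--             c1 = c1 - e if c1 is not None and c1 >= e else None
--             c2 = best[u - 1] if 0 < u <= cap else None
--             if c1 is not None and c2 is not None:
--                 new.append(max(c1, c2))
--             elif c1 is not None:
--                 new.append(c1)
--             else:
--                 new.append(c2)
--         if all(v is None for v in new):
--             return rounds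
--         best = new
--     return len(enemy)
-- ===== Notes on version B (the rewrite author's own statement) =====
-- stated objective: faster
-- what changed: A carries the full exponential list of (health, immunities-left) states, doubling it each round; B keeps one DP slot per number of immunities used, storing only the maximal reachable health, so each round is O(min(rounds,k)) instead of state-list doubling.
import Mathlib
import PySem

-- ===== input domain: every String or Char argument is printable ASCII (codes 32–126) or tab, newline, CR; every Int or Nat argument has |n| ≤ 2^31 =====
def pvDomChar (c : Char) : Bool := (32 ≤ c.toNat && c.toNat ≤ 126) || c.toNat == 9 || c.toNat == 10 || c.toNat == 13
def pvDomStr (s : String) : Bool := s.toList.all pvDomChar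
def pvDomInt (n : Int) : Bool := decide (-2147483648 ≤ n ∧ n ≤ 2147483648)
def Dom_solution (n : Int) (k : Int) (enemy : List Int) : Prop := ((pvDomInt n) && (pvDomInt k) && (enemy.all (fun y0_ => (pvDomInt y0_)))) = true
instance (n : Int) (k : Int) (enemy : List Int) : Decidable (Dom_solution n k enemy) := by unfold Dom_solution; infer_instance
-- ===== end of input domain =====

-- B replaces A's exponential list of (health, immunity) states by a DP keeping, per
-- number of immunities used, only the maximal reachable health (objective: faster).

-- ===== PORT A =====
-- one round of A's inner loop: each surviving state branches into immunity / subtraction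
def solStep (e : Int) (result : List (Int × Int)) : List (Int × Int) :=
  result.foldl (fun tmp r =>
    (tmp ++ (if r.2 - 1 ≥ 0 then [(r.1, r.2 - 1)] else []))
        ++ (if r.1 - e ≥ 0 then [(r.1 - e, r.2)] else [])) []

def solAux (total : Int) : List Int → List (Int × Int) → Int → Int
  | [], _, _ => total
  | e :: rest, result, cnt =>
    let tmp := solStep e result
    if tmp = [] then (cnt + 1) - 1 else solAux total rest tmp (cnt + 1)

def solution (n : Int) (k : Int) (enemy : List Int) : Int :=
  solAux (Int.ofNat enemy.length) enemy [(n, k)] 0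

-- ===== PORT B =====
-- one DP round: slot u = max health with u immunities used (none = unreachable)
def altStep (cap : Nat) (e : Int) (best : List (Option Int)) : List (Option Int) :=
  (List.range (min best.length cap + 1)).map (fun u =>
    let c1 : Option Int :=
      match best.getD u none with
      | some h => if h ≥ e then some (h - e) else none
      | none => none
    let c2 : Option Int := if 0 < u ∧ u ≤ cap then best.getD (u - 1) none else none
    match c1, c2 with
    | some a, some b => some (max a b)
    | some a, none => some a
    | none, c2 => c2)

def altAux (cap : Nat) (total : Int) : List Int → List (Option Int) → Int → Int
  | [], _, _ => total
  | e :: rest, best, rounds =>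
    let nw := altStep cap e best
    if nw.all (· = none) then rounds else altAux cap total rest nw (rounds + 1)

def solution_alt (n : Int) (k : Int) (enemy : List Int) : Int :=
  altAux (max k 0).toNat (Int.ofNat enemy.length) enemy [some n] 0

-- ===== PRECONDITION & SPEC =====
def Spec_solution (n : Int) (k : Int) (enemy : List Int) (out : Int) : Prop := out = solution_alt n k enemy
instance (n : Int) (k : Int) (enemy : List Int) (out : Int) : Decidable (Spec_solution n k enemy out) := by unfold Spec_solution; infer_instance

-- ===== CLAIM (what is proved, stated in full; the proofs are below) =====
def Claim_equal_solution : Prop := ∀ (n : Int) (k : Int) (enemy : List Int), Dom_solution n k enemy → Spec_solution n k enemy (solution n k enemy)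

-- ===== LEMMAS AND PROOFS =====

-- the coupling invariant: slot u of best is the max health among A-states with
-- immunity k - u (none iff that group is empty), and every A-state falls in a slot
abbrev SlotOK (k : Int) (result : List (Int × Int)) (u : Nat) (s : Option Int) : Prop :=
  match s with
  | some h => (h, k - u) ∈ result ∧ ∀ h', (h', k - u) ∈ result → h' ≤ h
  | none => ∀ h', ¬ (h', k - u) ∈ result

def PVInv (k : Int) (cap : Nat) (result : List (Int × Int)) (best : List (Option Int)) : Prop :=
  best.length ≤ cap + 1 ∧
  (∀ u : Nat, u < best.length → SlotOK k result u (best.getD u none)) ∧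
  (∀ h j, (h, j) ∈ result → ∃ u : Nat, u < best.length ∧ j = k - u)

theorem mem_solStep (e : Int) (result : List (Int × Int)) (h' j' : Int) :
    (h', j') ∈ solStep e result ↔
      ∃ h j, (h, j) ∈ result ∧
        ((j - 1 ≥ 0 ∧ h' = h ∧ j' = j - 1) ∨ (h - e ≥ 0 ∧ h' = h - e ∧ j' = j)) := by
  unfold solStep
  simp only [List.append_assoc]
  rw [PySem.List.foldl_append_eq_flatMap]
  simp only [List.nil_append, List.mem_flatMap, List.mem_append, Prod.exists]
  constructor
  · rintro ⟨a, b, hm, hc | hc⟩ <;> split_ifs at hc with hcond <;> simp at hc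
    · exact ⟨a, b, hm, Or.inl ⟨hcond, hc.1, hc.2⟩⟩
    · exact ⟨a, b, hm, Or.inr ⟨hcond, hc.1, hc.2⟩⟩
  · rintro ⟨a, b, hm, ⟨h1, h2, h3⟩ | ⟨h1, h2, h3⟩⟩
    · exact ⟨a, b, hm, Or.inl (by simp [h2, h3]; omega)⟩
    · exact ⟨a, b, hm, Or.inr (by simp [h2, h3]; omega)⟩

theorem getD_altStep (cap : Nat) (e : Int) (best : List (Option Int)) (u : Nat)
    (hu : u < min best.length cap + 1) :
    (altStep cap e best).getD u none =
      (let c1 : Option Int :=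
        match best.getD u none with
        | some h => if h ≥ e then some (h - e) else none
        | none => none
      let c2 : Option Int := if 0 < u ∧ u ≤ cap then best.getD (u - 1) none else none
      match c1, c2 with
      | some a, some b => some (max a b)
      | some a, none => some a
      | none, c2 => c2) := by
  simp [altStep, List.getD_eq_getElem?_getD, hu]

theorem length_altStep (cap : Nat) (e : Int) (best : List (Option Int)) :
    (altStep cap e best).length = min best.length cap + 1 := by
  simp [altStep]

-- totalized slot clause: holds for every index, slots past the end being empty groups
theorem slot_total (k : Int) (cap : Nat) (result : List (Int × Int)) (best : List (Option Int))
    (hI : PVInv k cap result best) (u : Nat) :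
    SlotOK k result u (best.getD u none) := by
  obtain ⟨hlen, hslot, hcov⟩ := hI
  by_cases hu : u < best.length
  · exact hslot u hu
  · rw [List.getD_eq_default _ _ (by omega)]
    intro h' hm
    obtain ⟨w, hw, heq⟩ := hcov h' (k - u) hm
    omega

-- where a member of the new round's group u must come from
theorem step_group_char (k : Int) (cap : Nat) (result : List (Int × Int))
    (best : List (Option Int)) (e : Int) (hI : PVInv k cap result best)
    (u : Nat) (h' : Int) (hm : (h', k - u) ∈ solStep e result) :
    (∃ m, best.getD u none = some m ∧ e ≤ m ∧ h' ≤ m - e) ∨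
    (∃ m1, 0 < u ∧ (u : Int) ≤ k ∧ best.getD (u - 1) none = some m1 ∧ h' ≤ m1) := by
  rw [mem_solStep] at hm
  obtain ⟨a, b, hmem, ⟨hb1, hha, hju⟩ | ⟨hae, hha, hju⟩⟩ := hm
  · -- immunity branch: b = k - (u-1), so the source lies in slot u-1
    obtain ⟨w, hw, hbw⟩ := hI.2.2 a b hmem
    have hwu : w = u - 1 := by omega
    have hupos : 0 < u := by omega
    have hmw : (a, k - (w : Int)) ∈ result := by rw [hbw] at hmem; exact hmem
    have hs := slot_total k cap result best hI w
    cases hsw : best.getD w none with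
    | none => rw [hsw] at hs; exact absurd hmw (hs a)
    | some m1 =>
        rw [hsw] at hs
        refine Or.inr ⟨m1, hupos, by omega, by rwa [hwu] at hsw, ?_⟩
        have := hs.2 a hmw
        omega
  · -- subtraction branch: the source lies in slot u itself
    have hmw : (a, k - (u : Int)) ∈ result := by rw [hju]; exact hmem
    have hs := slot_total k cap result best hI u
    cases hsu : best.getD u none with
    | none => rw [hsu] at hs; exact absurd hmw (hs a)
    | some m =>
        rw [hsu] at hs
        have := hs.2 a hmw
        exact Or.inl ⟨m, rfl, by omega, by omega⟩

-- membership introduction rules for the new round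
theorem mem_step_sub (k : Int) (result : List (Int × Int)) (e : Int) (u : Nat) (h : Int)
    (hmem : (h, k - (u : Int)) ∈ result) (hge : e ≤ h) :
    (h - e, k - (u : Int)) ∈ solStep e result :=
  (mem_solStep e result _ _).mpr ⟨h, k - u, hmem, Or.inr ⟨by omega, rfl, rfl⟩⟩

theorem mem_step_imm (k : Int) (result : List (Int × Int)) (e : Int) (u : Nat) (h1 : Int)
    (hmem : (h1, k - ((u - 1 : Nat) : Int)) ∈ result) (hupos : 0 < u) (huk : (u : Int) ≤ k) :
    (h1, k - (u : Int)) ∈ solStep e result :=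
  (mem_solStep e result _ _).mpr
    ⟨h1, k - ((u - 1 : Nat) : Int), hmem, Or.inl ⟨by omega, rfl, by omega⟩⟩

theorem inv_empty_iff (k : Int) (cap : Nat) (result : List (Int × Int)) (best : List (Option Int))
    (hI : PVInv k cap result best) :
    (result = [] ↔ best.all (· = none) = true) := by
  obtain ⟨hlen, hslot, hcov⟩ := hI
  rw [List.all_eq_true]
  constructor
  · intro hres x hx
    obtain ⟨u, hu, hxu⟩ := List.mem_iff_getElem.mp hx
    have hs := hslot u hu
    rw [List.getD_eq_getElem _ _ hu, hxu] at hs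
    cases x with
    | none => simp
    | some h => rw [hres] at hs; exact absurd hs.1 (by simp)
  · intro hall
    cases hres : result with
    | nil => rfl
    | cons r rest =>
        exfalso
        have hmem : (r.1, r.2) ∈ result := by rw [hres]; simp
        obtain ⟨u, hu, hj⟩ := hcov r.1 r.2 hmem
        have hs := hslot u hu
        have hnone : best.getD u none = none := by
          have := hall (best[u]'hu) (List.getElem_mem hu)
          rw [List.getD_eq_getElem _ _ hu]
          simpa using this
        rw [hnone] at hs
        exact hs r.1 (by rw [← hj]; exact hmem)

theorem inv_step (k : Int) (cap : Nat) (hcap : cap = (max k 0).toNat)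
    (result : List (Int × Int)) (best : List (Option Int)) (e : Int)
    (hI : PVInv k cap result best) :
    PVInv k cap (solStep e result) (altStep cap e best) := by
  refine ⟨by rw [length_altStep]; omega, ?_, ?_⟩
  · intro u hu
    rw [length_altStep] at hu
    have hchar := step_group_char k cap result best e hI u
    have hsu := slot_total k cap result best hI u
    have hsu1 := slot_total k cap result best hI (u - 1)
    cases hbu : best.getD u none with
    | some h =>
      rw [hbu] at hsu
      have hmemu := hsu.1
      have hmaxu := hsu.2
      by_cases hge : h ≥ e
      · by_cases hc2 : 0 < u ∧ u ≤ cap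
        · cases hbu1 : best.getD (u - 1) none with
          | some h1 =>
            rw [hbu1] at hsu1
            have heq : (altStep cap e best).getD u none = some (max (h - e) h1) := by
              rw [getD_altStep cap e best u hu]; simp only [hbu, hbu1]; simp [hge, hc2]
            rw [heq]
            constructor
            · rcases max_choice (h - e) h1 with hmx | hmx <;> rw [hmx]
              · exact mem_step_sub k result e u h hmemu hge
              · exact mem_step_imm k result e u h1 hsu1.1 hc2.1 (by omega)
            · intro h'' hm''
              rcases hchar h'' hm'' with ⟨m, hmeq, _, hle⟩ | ⟨m1, _, _, hmeq, hle⟩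
              · rw [hbu] at hmeq; injection hmeq with hmeq; subst hmeq
                exact le_trans hle (le_max_left _ _)
              · rw [hbu1] at hmeq; injection hmeq with hmeq; subst hmeq
                exact le_trans hle (le_max_right _ _)
          | none =>
            have heq : (altStep cap e best).getD u none = some (h - e) := by
              rw [getD_altStep cap e best u hu]; simp only [hbu, hbu1]; simp [hge, hc2]
            rw [heq]
            refine ⟨mem_step_sub k result e u h hmemu hge, ?_⟩
            intro h'' hm''
            rcases hchar h'' hm'' with ⟨m, hmeq, _, hle⟩ | ⟨m1, _, _, hmeq, _⟩
            · rw [hbu] at hmeq; injection hmeq with hmeq; subst hmeq; exact hle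
            · rw [hbu1] at hmeq; exact absurd hmeq (by simp)
        · have heq : (altStep cap e best).getD u none = some (h - e) := by
            rw [getD_altStep cap e best u hu]; simp only [hbu]; simp [hge, hc2]
          rw [heq]
          refine ⟨mem_step_sub k result e u h hmemu hge, ?_⟩
          intro h'' hm''
          rcases hchar h'' hm'' with ⟨m, hmeq, _, hle⟩ | ⟨m1, hupos, huk, _, _⟩
          · rw [hbu] at hmeq; injection hmeq with hmeq; subst hmeq; exact hle
          · exact absurd (⟨hupos, by omega⟩ : 0 < u ∧ u ≤ cap) hc2
      · by_cases hc2 : 0 < u ∧ u ≤ cap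
        · cases hbu1 : best.getD (u - 1) none with
          | some h1 =>
            rw [hbu1] at hsu1
            have heq : (altStep cap e best).getD u none = some h1 := by
              rw [getD_altStep cap e best u hu]; simp only [hbu, hbu1]; simp [hge, hc2]
            rw [heq]
            refine ⟨mem_step_imm k result e u h1 hsu1.1 hc2.1 (by omega), ?_⟩
            intro h'' hm''
            rcases hchar h'' hm'' with ⟨m, hmeq, hem, _⟩ | ⟨m1, _, _, hmeq, hle⟩
            · rw [hbu] at hmeq; injection hmeq with hmeq; omega
            · rw [hbu1] at hmeq; injection hmeq with hmeq; subst hmeq; exact hle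
          | none =>
            have heq : (altStep cap e best).getD u none = none := by
              rw [getD_altStep cap e best u hu]; simp only [hbu, hbu1]; simp [hge, hc2]
            rw [heq]
            intro h'' hm''
            rcases hchar h'' hm'' with ⟨m, hmeq, hem, _⟩ | ⟨m1, _, _, hmeq, _⟩
            · rw [hbu] at hmeq; injection hmeq with hmeq; omega
            · rw [hbu1] at hmeq; exact absurd hmeq (by simp)
        · have heq : (altStep cap e best).getD u none = none := by
            rw [getD_altStep cap e best u hu]; simp only [hbu]; simp [hge, hc2]
          rw [heq]
          intro h'' hm''
          rcases hchar h'' hm'' with ⟨m, hmeq, hem, _⟩ | ⟨m1, hupos, huk, _, _⟩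
          · rw [hbu] at hmeq; injection hmeq with hmeq; omega
          · exact absurd (⟨hupos, by omega⟩ : 0 < u ∧ u ≤ cap) hc2
    | none =>
      rw [hbu] at hsu
      by_cases hc2 : 0 < u ∧ u ≤ cap
      · cases hbu1 : best.getD (u - 1) none with
        | some h1 =>
          rw [hbu1] at hsu1
          have heq : (altStep cap e best).getD u none = some h1 := by
            rw [getD_altStep cap e best u hu]; simp only [hbu, hbu1]; simp [hc2]
          rw [heq]
          refine ⟨mem_step_imm k result e u h1 hsu1.1 hc2.1 (by omega), ?_⟩
          intro h'' hm''
          rcases hchar h'' hm'' with ⟨m, hmeq, _, _⟩ | ⟨m1, _, _, hmeq, hle⟩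
          · rw [hbu] at hmeq; exact absurd hmeq (by simp)
          · rw [hbu1] at hmeq; injection hmeq with hmeq; subst hmeq; exact hle
        | none =>
          have heq : (altStep cap e best).getD u none = none := by
            rw [getD_altStep cap e best u hu]; simp only [hbu, hbu1]; simp [hc2]
          rw [heq]
          intro h'' hm''
          rcases hchar h'' hm'' with ⟨m, hmeq, _, _⟩ | ⟨m1, _, _, hmeq, _⟩
          · rw [hbu] at hmeq; exact absurd hmeq (by simp)
          · rw [hbu1] at hmeq; exact absurd hmeq (by simp)
      · have heq : (altStep cap e best).getD u none = none := by
          rw [getD_altStep cap e best u hu]; simp only [hbu]; simp [hc2]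
        rw [heq]
        intro h'' hm''
        rcases hchar h'' hm'' with ⟨m, hmeq, _, _⟩ | ⟨m1, hupos, huk, _, _⟩
        · rw [hbu] at hmeq; exact absurd hmeq (by simp)
        · exact absurd (⟨hupos, by omega⟩ : 0 < u ∧ u ≤ cap) hc2
  · intro h j hm
    rw [length_altStep]
    rw [mem_solStep] at hm
    obtain ⟨a, b, hmem, ⟨hb1, _, hj⟩ | ⟨_, _, hj⟩⟩ := hm
    · obtain ⟨w, hw, hbw⟩ := hI.2.2 a b hmem
      have hlen := hI.1
      refine ⟨w + 1, by omega, by omega⟩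
    · obtain ⟨w, hw, hbw⟩ := hI.2.2 a b hmem
      have hlen := hI.1
      refine ⟨w, by omega, by omega⟩

theorem loop_eq (k : Int) (cap : Nat) (hcap : cap = (max k 0).toNat) (total : Int)
    (enemies : List Int) :
    ∀ (result : List (Int × Int)) (best : List (Option Int)) (cnt : Int),
    PVInv k cap result best →
    solAux total enemies result cnt = altAux cap total enemies best cnt := by
  induction enemies with
  | nil => intro _ _ _ _; rfl
  | cons e rest ih =>
    intro result best cnt hI
    have hI' := inv_step k cap hcap result best e hI
    have hiff := inv_empty_iff k cap (solStep e result) (altStep cap e best) hI'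
    simp only [solAux, altAux]
    by_cases hemp : solStep e result = []
    · rw [if_pos hemp, if_pos (hiff.mp hemp)]; omega
    · rw [if_neg hemp, if_neg (fun hb => hemp (hiff.mpr hb))]
      exact ih _ _ _ hI'

-- ===== VERDICT (by name: the statement is the Claim_ definition above) =====
theorem solution_spec : Claim_equal_solution := by
  intro n k enemy _
  unfold Spec_solution solution solution_alt
  apply loop_eq k _ rfl
  refine ⟨by simp, ?_, ?_⟩
  · intro u hu
    have hu0 : u = 0 := by simpa using hu
    subst hu0
    simp only [List.getD]
    constructor
    · simp
    · rintro h' hm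
      simp at hm
      omega
  · rintro h j hm
    simp at hm
    exact ⟨0, by simp, by omega⟩
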